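-- pv_equiv track=rewrite | github.com/bcgsc/rnaseq_utils | scripts/gtf_features.py | get_tid_gid_from_attribute_col
-- ===== SOURCE A (Python) =====
-- def get_tid_gid_from_attribute_col(col):
--     tid = None
--     gid = None
--     for info in col.rstrip(';').split(';'):
--         key, val = info.strip().split(' ', 1)
--         if key == 'transcript_id':
--             tid = val.strip('"')
--         elif key == 'gene_id':
--             gid = val.strip('"')
--     return tid, gid
-- ===== SOURCE B (Python) =====
-- def get_tid_gid_from_attribute_col(col):
--     pairs = []
--     for info in col.rstrip(';').split(';'):
--         key, val = info.strip().split(' ', 1)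
--         pairs.append((key, val))
--     tid = next((val.strip('"') for key, val in reversed(pairs) if key == 'transcript_id'), None)
--     gid = next((val.strip('"') for key, val in reversed(pairs) if key == 'gene_id'), None)
--     return tid, gid
-- ===== Notes on version B (the rewrite author's own statement) =====
-- stated objective: alternative
-- what changed: B first parses the whole attribute column into a list of (key, val) pairs, then runs two independent reverse searches (first match from the end = A's last-assignment-wins), replacing A's single forward loop with per-key if/elif branching and in-loop assignment.
import Mathlib
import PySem

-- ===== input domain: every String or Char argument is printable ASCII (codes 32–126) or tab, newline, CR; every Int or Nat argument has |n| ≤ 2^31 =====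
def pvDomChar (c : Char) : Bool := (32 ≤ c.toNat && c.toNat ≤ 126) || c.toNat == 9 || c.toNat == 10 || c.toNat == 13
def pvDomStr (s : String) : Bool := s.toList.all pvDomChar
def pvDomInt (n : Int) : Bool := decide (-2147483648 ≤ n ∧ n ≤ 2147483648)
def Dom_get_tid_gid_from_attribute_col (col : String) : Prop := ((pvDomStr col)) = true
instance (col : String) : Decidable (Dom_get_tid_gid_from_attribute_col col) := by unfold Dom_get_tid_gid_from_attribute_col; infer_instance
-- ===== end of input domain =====

-- B parses all (key, val) pairs in one pass and then runs two independent reverse searches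
-- (first match from the end = A's last-assignment-wins), instead of A's single forward loop
-- with per-key if/elif branching (objective: alternative; same asymptotic cost).

-- col.rstrip(';'): drop ';' characters from the right end only (exact: rstrip with a chars argument)
def pvRstripSemis (cs : List Char) : List Char := (cs.reverse.dropWhile (· == ';')).reverse

-- the segments both Pythons iterate over: col.rstrip(';').split(';')
def pvSegs (cs : List Char) : List (List Char) := PySem.Chars.splitOn (pvRstripSemis cs) [';']

-- val.strip('"')
def pvUnquote (cs : List Char) : List Char := PySem.Chars.stripChars cs ['"']

-- ===== PORT A =====
-- loop state (tid, gid); `none` = the unpacking `key, val = …` raised ValueError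
def pvALoop (segs : List (List Char)) (st : Option (Option String × Option String)) :
    Option (Option String × Option String) :=
  segs.foldl
    (fun st info =>
      match st with
      | none => none
      | some (tid, gid) =>
        match PySem.Chars.splitOnMax (PySem.Chars.strip info) [' '] 1 with
        | [key, val] =>
          if key = "transcript_id".toList then some (some (String.ofList (pvUnquote val)), gid)
          else if key = "gene_id".toList then some (tid, some (String.ofList (pvUnquote val)))
          else some (tid, gid)
        | _ => none)   -- key, val = … raises ValueError (excluded by Pre_)
    st

def get_tid_gid_from_attribute_col (col : String) : Option String × Option String :=
  (pvALoop (pvSegs col.toList) (some (none, none))).getD (none, none)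

-- ===== PORT B =====
-- Source B's parse loop: build the (key, val) list; `none` = the same unpacking ValueError
def pvParse (segs : List (List Char)) : Option (List (List Char × List Char)) :=
  match segs with
  | [] => some []
  | info :: rest =>
    match PySem.Chars.splitOnMax (PySem.Chars.strip info) [' '] 1 with
    | [key, val] => (pvParse rest).map (fun ps => (key, val) :: ps)
    | _ => none

-- next((val.strip('"') for key, val in reversed(pairs) if key == k), None)
def pvFindRev (pairs : List (List Char × List Char)) (k : List Char) : Option String :=
  match pairs.reverse.find? (fun p => p.1 == k) with
  | some p => some (String.ofList (pvUnquote p.2))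
  | none => none

def get_tid_gid_from_attribute_col_alt (col : String) : Option String × Option String :=
  match pvParse (pvSegs col.toList) with
  | some pairs => (pvFindRev pairs "transcript_id".toList, pvFindRev pairs "gene_id".toList)
  | none => (none, none)

-- ===== PRECONDITION & SPEC =====
-- Pre_ excludes exactly the inputs where some ';'-segment, stripped, does not split into
-- key and value (no space): there `key, val = info.strip().split(' ', 1)` raises ValueError in both Pythons.
def Pre_get_tid_gid_from_attribute_col (col : String) : Prop :=
  ∀ info ∈ pvSegs col.toList, (PySem.Chars.splitOnMax (PySem.Chars.strip info) [' '] 1).length = 2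
instance (col : String) : Decidable (Pre_get_tid_gid_from_attribute_col col) := by unfold Pre_get_tid_gid_from_attribute_col; infer_instance

def pvWitness_get_tid_gid_from_attribute_col : String := "gene_id \"g1\"; transcript_id \"t1\";"

def Spec_get_tid_gid_from_attribute_col (col : String) (out : Option String × Option String) : Prop := out = get_tid_gid_from_attribute_col_alt col
instance (col : String) (out : Option String × Option String) : Decidable (Spec_get_tid_gid_from_attribute_col col out) := by unfold Spec_get_tid_gid_from_attribute_col; infer_instance

-- ===== CLAIM (what is proved, stated in full; the proofs are below) =====
def Claim_equal_get_tid_gid_from_attribute_col : Prop := ∀ (col : String), Dom_get_tid_gid_from_attribute_col col → Pre_get_tid_gid_from_attribute_col col → Spec_get_tid_gid_from_attribute_col col (get_tid_gid_from_attribute_col col)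

-- ===== LEMMAS AND PROOFS =====

-- 'first match from the end, else the running default' — the bridge between B's reverse
-- search and A's forward overwrite
def pvPick (pairs : List (List Char × List Char)) (k : List Char) (d : Option String) : Option String :=
  match pairs.reverse.find? (fun p => p.1 == k) with
  | some p => some (String.ofList (pvUnquote p.2))
  | none => d

-- pushing one parsed pair into the default: exactly what one step of A's loop does
theorem pvPick_cons (kv : List Char × List Char) (pr : List (List Char × List Char))
    (k : List Char) (d : Option String) :
    pvPick (kv :: pr) k d
      = pvPick pr k (if kv.1 = k then some (String.ofList (pvUnquote kv.2)) else d) := by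
  unfold pvPick
  rw [List.reverse_cons, List.find?_append]
  cases h : pr.reverse.find? (fun p => p.1 == k) with
  | some p => rfl
  | none =>
    simp only [List.find?_cons, List.find?_nil]
    by_cases hk : kv.1 = k
    · simp [hk]
    · have hb : (kv.1 == k) = false := by simp [hk]
      rw [hb, if_neg hk]; rfl

-- the heart: A's forward last-wins loop from any start state computes, per key, the
-- reverse-search-with-default over B's parsed pair list
theorem pvLoop_invariant (segs : List (List Char))
    (hwf : ∀ info ∈ segs, (PySem.Chars.splitOnMax (PySem.Chars.strip info) [' '] 1).length = 2) :
    ∃ pairs, pvParse segs = some pairs ∧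
      ∀ t0 g0 : Option String, pvALoop segs (some (t0, g0)) =
        some (pvPick pairs "transcript_id".toList t0, pvPick pairs "gene_id".toList g0) := by
  induction segs with
  | nil => exact ⟨[], rfl, fun t0 g0 => rfl⟩
  | cons seg rest ih =>
    have hseg := hwf seg (by simp)
    obtain ⟨key, val, hsplit⟩ :
        ∃ k v, PySem.Chars.splitOnMax (PySem.Chars.strip seg) [' '] 1 = [k, v] := by
      match h : PySem.Chars.splitOnMax (PySem.Chars.strip seg) [' '] 1 with
      | [k, v] => exact ⟨k, v, rfl⟩
      | [] | [_] | _ :: _ :: _ :: _ => rw [h] at hseg; simp at hseg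
    obtain ⟨pairs, hP, hLoop⟩ := ih (fun info hm => hwf info (by simp [hm]))
    refine ⟨(key, val) :: pairs, ?_, ?_⟩
    · unfold pvParse; rw [hsplit, hP]; rfl
    · intro t0 g0
      have hstep : pvALoop (seg :: rest) (some (t0, g0)) =
          pvALoop rest (if key = "transcript_id".toList
            then some (some (String.ofList (pvUnquote val)), g0)
            else if key = "gene_id".toList then some (t0, some (String.ofList (pvUnquote val)))
            else some (t0, g0)) := by
        unfold pvALoop
        rw [List.foldl_cons, hsplit]
      rw [hstep, pvPick_cons, pvPick_cons]
      by_cases ht : key = "transcript_id".toList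
      · rw [if_pos ht, hLoop]
        have hg : ¬ key = "gene_id".toList := by subst ht; decide
        rw [if_pos ht, if_neg hg]
      · by_cases hg : key = "gene_id".toList
        · rw [if_neg ht, if_pos hg, hLoop, if_neg ht, if_pos hg]
        · rw [if_neg ht, if_neg hg, hLoop, if_neg ht, if_neg hg]

-- ===== VERDICT (by name: the statement is the Claim_ definition above) =====
theorem get_tid_gid_from_attribute_col_spec : Claim_equal_get_tid_gid_from_attribute_col := by
  intro col _ hpre
  unfold Spec_get_tid_gid_from_attribute_col
  unfold get_tid_gid_from_attribute_col get_tid_gid_from_attribute_col_alt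
  obtain ⟨pairs, hP, hLoop⟩ := pvLoop_invariant (pvSegs col.toList) hpre
  rw [hP, hLoop]
  rfl
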